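-- pv_equiv track=rewrite | github.com/EsosaOrumwese/fraud-detection-system | scripts/dev_substrate/m11j_cost_outcome_closure.py | dedupe_blockers
-- ===== SOURCE A (Python) =====
-- def dedupe_blockers(rows: list[dict[str, str]]) -> list[dict[str, str]]:
--     out: list[dict[str, str]] = []
--     seen: set[tuple[str, str]] = set()
--     for row in rows:
--         code = str(row.get("code", "")).strip()
--         message = str(row.get("message", "")).strip()
--         sig = (code, message)
--         if sig in seen:
--             continue
--         seen.add(sig)
--         out.append({"code": code, "message": message})
--     return out
-- ===== SOURCE B (Python) =====
-- def dedupe_blockers(rows: list[dict[str, str]]) -> list[dict[str, str]]: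
--     norm = [(str(r.get("code", "")).strip(), str(r.get("message", "")).strip()) for r in rows]
--     first: dict[tuple[str, str], int] = {}
--     for i, sig in reversed(list(enumerate(norm))):
--         first[sig] = i  # walking backward, earlier occurrences overwrite later ones
--     return [{"code": norm[i][0], "message": norm[i][1]} for i in sorted(first.values())]
-- ===== Notes on version B (the rewrite author's own statement) =====
-- stated objective: alternative
-- what changed: Replaces A's forward seen-set skip/append loop by an index pipeline: a backward overwrite pass records each signature's first index in a dict, the first indices are sorted, and the output rows are rebuilt by indexing into the normalized list.
import Mathlib
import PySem

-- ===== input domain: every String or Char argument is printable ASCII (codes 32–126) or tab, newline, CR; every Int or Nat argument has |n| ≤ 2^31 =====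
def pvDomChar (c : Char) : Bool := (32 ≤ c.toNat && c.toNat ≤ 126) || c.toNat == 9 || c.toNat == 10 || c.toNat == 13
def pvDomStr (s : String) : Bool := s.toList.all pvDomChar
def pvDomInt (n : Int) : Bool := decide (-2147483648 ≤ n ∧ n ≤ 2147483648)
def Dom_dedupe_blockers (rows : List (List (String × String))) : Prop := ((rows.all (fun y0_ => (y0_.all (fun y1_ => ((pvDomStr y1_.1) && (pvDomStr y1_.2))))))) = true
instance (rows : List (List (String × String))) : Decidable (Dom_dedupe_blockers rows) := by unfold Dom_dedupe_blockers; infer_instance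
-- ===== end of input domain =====

-- B replaces A's forward seen-set skip/append loop by an index pipeline: a backward overwrite
-- pass records each signature's first index, the indices are sorted, rows are rebuilt by indexing.

-- ===== PORT A =====
def dedupe_blockers (rows : List (List (String × String))) : List (List (String × String)) :=
  (rows.foldl
    (fun (st : List (List (String × String)) × PySem.Set (String × String)) row =>
      let code := PySem.Str.strip (PySem.Dict.getD (PySem.Dict.mk row) "code" "")
      let message := PySem.Str.strip (PySem.Dict.getD (PySem.Dict.mk row) "message" "")
      let sig := (code, message)
      if PySem.Set.contains st.2 sig then st
      else (st.1 ++ [[("code", code), ("message", message)]], PySem.Set.add st.2 sig))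
    (([] : List (List (String × String))), (PySem.Set.empty : PySem.Set (String × String)))).1

-- ===== PORT B =====
-- normalized signature of one row: (row.get("code","").strip(), row.get("message","").strip())
def pvNormSig (row : List (String × String)) : String × String :=
  (PySem.Str.strip (PySem.Dict.getD (PySem.Dict.mk row) "code" ""),
   PySem.Str.strip (PySem.Dict.getD (PySem.Dict.mk row) "message" ""))

def dedupe_blockers_alt (rows : List (List (String × String))) : List (List (String × String)) :=
  let norm := rows.map pvNormSig
  -- for i, sig in reversed(list(enumerate(norm))): first[sig] = i
  let first := ((PySem.List.enumerate norm 0).reverse).foldl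
      (fun d p => d.insert p.2 p.1)
      (PySem.Dict.mk ([] : List ((String × String) × Int)))
  -- [{"code": norm[i][0], "message": norm[i][1]} for i in sorted(first.values())]
  (PySem.List.sorted (PySem.Dict.values first) (fun i => i)).map
    (fun i =>
      let cm := (PySem.List.pyGet? norm i).getD ("", "")
      [("code", cm.1), ("message", cm.2)])

-- ===== PRECONDITION & SPEC =====
def Spec_dedupe_blockers (rows : List (List (String × String))) (out : List (List (String × String))) : Prop := out = dedupe_blockers_alt rows
instance (rows : List (List (String × String))) (out : List (List (String × String))) : Decidable (Spec_dedupe_blockers rows out) := by unfold Spec_dedupe_blockers; infer_instance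

-- ===== CLAIM (what is proved, stated in full; the proofs are below) =====
def Claim_equal_dedupe_blockers : Prop := ∀ (rows : List (List (String × String))), Dom_dedupe_blockers rows → Spec_dedupe_blockers rows (dedupe_blockers rows)

-- ===== LEMMAS AND PROOFS =====
def pvToDict (cm : String × String) : List (String × String) := [("code", cm.1), ("message", cm.2)]

-- first index of signature s in the enumerated list e (0 if absent, never used then)
def pvFI (e : List (Int × (String × String))) (s : String × String) : Int :=
  ((e.find? (fun p => p.2 == s)).map (·.1)).getD 0

-- ---- A-side: the seen-set fold produces (ofList sigs).map pvToDict ----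
theorem pv_fold_inv (sigs : List (String × String)) (seen : PySem.Set (String × String)) :
    (sigs.foldl
      (fun (st : List (List (String × String)) × PySem.Set (String × String)) sig =>
        if PySem.Set.contains st.2 sig then st
        else (st.1 ++ [pvToDict sig], PySem.Set.add st.2 sig))
      (seen.map pvToDict, seen))
    = ((sigs.foldl PySem.Set.add seen).map pvToDict, sigs.foldl PySem.Set.add seen) := by
  induction sigs generalizing seen with
  | nil => rfl
  | cons sig rest ih =>
    simp only [List.foldl_cons]
    by_cases h : PySem.Set.contains seen sig = true
    · have hm : sig ∈ seen := by simpa [PySem.Set.contains, List.contains_iff_mem] using h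
      have hadd : PySem.Set.add seen sig = seen := by simp [PySem.Set.add, hm]
      simp only [h, if_pos, hadd]
      exact ih seen
    · have h' : PySem.Set.contains seen sig = false := by simpa using h
      have hm : sig ∉ seen := by simpa [PySem.Set.contains, List.contains_iff_mem] using h
      have hadd : PySem.Set.add seen sig = seen ++ [sig] := by simp [PySem.Set.add, hm]
      simp only [h', Bool.false_eq_true, if_false, hadd]
      simpa [pvToDict] using ih (seen ++ [sig])

theorem pv_A_eq (rows : List (List (String × String))) :
    dedupe_blockers rows = (PySem.Set.ofList (rows.map pvNormSig)).map pvToDict := by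
  unfold dedupe_blockers
  rw [show (rows.foldl
      (fun (st : List (List (String × String)) × PySem.Set (String × String)) row =>
        let code := PySem.Str.strip (PySem.Dict.getD (PySem.Dict.mk row) "code" "")
        let message := PySem.Str.strip (PySem.Dict.getD (PySem.Dict.mk row) "message" "")
        let sig := (code, message)
        if PySem.Set.contains st.2 sig then st
        else (st.1 ++ [[("code", code), ("message", message)]], PySem.Set.add st.2 sig))
      (([] : List (List (String × String))), (PySem.Set.empty : PySem.Set (String × String))))
    = ((rows.map pvNormSig).foldl
      (fun (st : List (List (String × String)) × PySem.Set (String × String)) sig =>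
        if PySem.Set.contains st.2 sig then st
        else (st.1 ++ [pvToDict sig], PySem.Set.add st.2 sig))
      ([], PySem.Set.empty)) from by
    rw [List.foldl_map]; rfl]
  have h := pv_fold_inv (rows.map pvNormSig) PySem.Set.empty
  conv_lhs => rw [show (([] : List (List (String × String))), (PySem.Set.empty : PySem.Set (String × String)))
    = (List.map pvToDict PySem.Set.empty, (PySem.Set.empty : PySem.Set (String × String))) from rfl]
  rw [h]
  simp [PySem.Set.ofList_eq_foldl, PySem.Set.empty]

-- ---- B-side: the reversed-fold dict maps each signature to its first index ----
theorem pv_get?_fold_rev (L : List (Int × (String × String))) (s : String × String) :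
    ((L.reverse.foldl (fun d p => d.insert p.2 p.1)
        (PySem.Dict.mk ([] : List ((String × String) × Int)))).get? s)
      = (L.find? (fun p => p.2 == s)).map (·.1) := by
  induction L with
  | nil => simp [PySem.Dict.get?]
  | cons p T ih =>
    rw [List.reverse_cons, List.foldl_append]
    simp only [List.foldl_cons, List.foldl_nil, List.find?_cons]
    rw [PySem.Dict.get?_insert]
    by_cases h : s = p.2
    · have hb : (p.2 == s) = true := beq_iff_eq.mpr h.symm
      rw [if_pos h, hb, h]
      rfl
    · have hb : (p.2 == s) = false := beq_eq_false_iff_ne.mpr (fun hh => h hh.symm)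
      rw [if_neg h, hb, ih]

theorem pv_keys_nodup (L : List (Int × (String × String))) :
    ((L.foldl (fun d p => d.insert p.2 p.1)
        (PySem.Dict.mk ([] : List ((String × String) × Int)))).keys).Nodup := by
  exact PySem.Dict.nodup_keys_foldl_insert_key L (fun p => p.2) (fun _ p => p.1) _ (by simp [PySem.Dict.keys])

-- the dict B builds: fold of insert over the reversed enumerated list
def pvDictOf (L : List (Int × (String × String))) : PySem.Dict (String × String) Int :=
  L.reverse.foldl (fun d p => d.insert p.2 p.1)
    (PySem.Dict.mk ([] : List ((String × String) × Int)))

theorem pv_get?_pvDictOf (L : List (Int × (String × String))) (s : String × String) :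
    (pvDictOf L).get? s = (L.find? (fun p => p.2 == s)).map (·.1) :=
  pv_get?_fold_rev L s

theorem pv_nodup_keys_pvDictOf (L : List (Int × (String × String))) :
    (pvDictOf L).keys.Nodup :=
  pv_keys_nodup L.reverse

theorem pv_mem_keys_pvDictOf (L : List (Int × (String × String))) (s : String × String) :
    s ∈ (pvDictOf L).keys ↔ s ∈ L.map (fun p => p.2) := by
  constructor
  · intro h
    by_contra hn
    have hnone : (L.find? (fun p => p.2 == s)) = none := by
      rw [List.find?_eq_none]
      intro x hx hpx
      exact hn (List.mem_map.mpr ⟨x, hx, by simpa using hpx⟩)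
    have : (pvDictOf L).get? s = none := by rw [pv_get?_pvDictOf, hnone]; rfl
    exact ((PySem.Dict.get?_eq_none_iff_not_mem_keys _ _).mp this) h
  · intro h
    obtain ⟨p, hp, hps⟩ := List.mem_map.mp h
    have hsome : (L.find? (fun p => p.2 == s)).isSome = true :=
      List.find?_isSome.mpr ⟨p, hp, by simp [hps]⟩
    by_contra hn
    have : (pvDictOf L).get? s = none :=
      (PySem.Dict.get?_eq_none_iff_not_mem_keys _ _).mpr hn
    rw [pv_get?_pvDictOf] at this
    cases hfind : L.find? (fun p => p.2 == s) with
    | none => rw [hfind] at hsome; simp at hsome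
    | some q => rw [hfind] at this; simp at this

theorem pv_values_pvDictOf (L : List (Int × (String × String))) :
    (pvDictOf L).values = (pvDictOf L).keys.map (fun s => pvFI L s) := by
  show (pvDictOf L).items.map (fun p => p.2)
      = ((pvDictOf L).items.map (fun p => p.1)).map (fun s => pvFI L s)
  rw [List.map_map]
  apply List.map_congr_left
  intro p hp
  have hget : (pvDictOf L).get? p.1 = some p.2 :=
    PySem.Dict.get?_of_mem_items (pvDictOf L) (by simpa using hp) (pv_nodup_keys_pvDictOf L)
  rw [pv_get?_pvDictOf] at hget
  simp only [Function.comp_apply, pvFI]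
  rw [hget]
  rfl

theorem pv_pairwise_aux (e : List (Int × (String × String)))
    (hp : e.Pairwise (fun p q => p.1 < q.1)) :
    ∀ (suf pre : List (Int × (String × String))), e = pre ++ suf →
    List.Pairwise (fun a b => pvFI e a < pvFI e b) (PySem.Set.ofList (pre.map (fun p => p.2))) →
    List.Pairwise (fun a b => pvFI e a < pvFI e b)
      (List.foldl PySem.Set.add (PySem.Set.ofList (pre.map (fun p => p.2)))
        (suf.map (fun p => p.2))) := by
  intro suf
  induction suf with
  | nil =>
    intro pre _ hacc
    simpa using hacc
  | cons p suf' ih =>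
    intro pre he hacc
    simp only [List.map_cons, List.foldl_cons]
    have hstep : PySem.Set.add (PySem.Set.ofList (pre.map (fun p => p.2))) p.2
        = PySem.Set.ofList ((pre ++ [p]).map (fun p => p.2)) := by
      rw [List.map_append, PySem.Set.ofList_eq_foldl, PySem.Set.ofList_eq_foldl,
        List.foldl_append]
      rfl
    rw [hstep]
    apply ih (pre ++ [p]) (by rw [he, List.append_assoc]; rfl)
    -- the accumulator stays sorted by first index after absorbing p.2
    by_cases hmem : p.2 ∈ PySem.Set.ofList (pre.map (fun p => p.2))
    · have : PySem.Set.ofList ((pre ++ [p]).map (fun p => p.2))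
          = PySem.Set.ofList (pre.map (fun p => p.2)) := by
        rw [← hstep]
        have hct : (PySem.Set.ofList (pre.map (fun p => p.2))).contains p.2 = true :=
          (PySem.Set.contains_iff _ _).mpr hmem
        unfold PySem.Set.add
        rw [if_pos hct]
      rw [this]; exact hacc
    · have hadd : PySem.Set.ofList ((pre ++ [p]).map (fun p => p.2))
          = PySem.Set.ofList (pre.map (fun p => p.2)) ++ [p.2] := by
        rw [← hstep]
        have hc : PySem.Set.contains (PySem.Set.ofList (pre.map (fun p => p.2))) p.2 = false := by
          by_contra hcc
          exact hmem ((PySem.Set.contains_iff _ _).mp (by simpa using hcc))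
        unfold PySem.Set.add
        rw [if_neg (by rw [hc]; exact Bool.false_ne_true)]
      rw [hadd, List.pairwise_append]
      refine ⟨hacc, List.pairwise_singleton _ _, ?_⟩
      intro a ha b hb
      rw [List.mem_singleton] at hb
      subst hb
      -- a was seen in pre, p.2 first occurs at p: compare first indices
      have ha' : a ∈ pre.map (fun p => p.2) := (PySem.Set.mem_ofList _ _).mp ha
      obtain ⟨qa0, hqa0, hqa0s⟩ := List.mem_map.mp ha'
      have hsomea : (pre.find? (fun q => q.2 == a)).isSome = true :=
        List.find?_isSome.mpr ⟨qa0, hqa0, by simp [hqa0s]⟩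
      obtain ⟨qa, hqa⟩ := Option.isSome_iff_exists.mp hsomea
      have hqamem : qa ∈ pre := List.mem_of_find?_eq_some hqa
      have hfia : pvFI e a = qa.1 := by
        rw [pvFI, he, List.find?_append, hqa]
        rfl
      have hnp : p.2 ∉ pre.map (fun p => p.2) := fun hc =>
        hmem ((PySem.Set.mem_ofList _ _).mpr hc)
      have hprenone : pre.find? (fun q => q.2 == p.2) = none := by
        rw [List.find?_eq_none]
        intro x hx hpx
        exact hnp (List.mem_map.mpr ⟨x, hx, by simpa using hpx⟩)
      have hfip : pvFI e p.2 = p.1 := by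
        rw [pvFI, he, List.find?_append, hprenone]
        simp
      rw [hfia, hfip]
      have := (List.pairwise_append.mp (by rwa [he] at hp)).2.2
      exact this qa hqamem p (List.mem_cons_self)

theorem pv_pairwise (norm : List (String × String)) :
    List.Pairwise
      (fun a b => pvFI (PySem.List.enumerate norm 0) a < pvFI (PySem.List.enumerate norm 0) b)
      (PySem.Set.ofList norm) := by
  have h := pv_pairwise_aux (PySem.List.enumerate norm 0)
    (PySem.List.pairwise_lt_enumerate norm 0) (PySem.List.enumerate norm 0) [] rfl
    (by simp [PySem.Set.ofList])
  rw [List.map_nil, PySem.List.map_snd_enumerate,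
    show (PySem.Set.ofList ([] : List (String × String))) = ([] : List (String × String)) from rfl,
    ← PySem.Set.ofList_eq_foldl] at h
  exact h

theorem pv_lookup (norm : List (String × String)) (s : String × String) (hs : s ∈ norm) :
    PySem.List.pyGet? norm (pvFI (PySem.List.enumerate norm 0) s) = some s := by
  have hsome : ((PySem.List.enumerate norm 0).find? (fun p => p.2 == s)).isSome = true := by
    obtain ⟨k, hk, hks⟩ := List.mem_iff_getElem.mp hs
    exact List.find?_isSome.mpr ⟨((0 : Int) + (k : Int), norm[k]),
      (PySem.List.mem_enumerate_iff _ _ _).mpr ⟨k, hk, rfl⟩, by simp [hks]⟩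
  obtain ⟨q, hq⟩ := Option.isSome_iff_exists.mp hsome
  have hqs : q.2 = s := by simpa using List.find?_some hq
  obtain ⟨k, hk, hqk⟩ := (PySem.List.mem_enumerate_iff _ _ _).mp (List.mem_of_find?_eq_some hq)
  have hfi : pvFI (PySem.List.enumerate norm 0) s = q.1 := by rw [pvFI, hq]; rfl
  rw [hfi, hqk]
  show PySem.List.pyGet? norm ((0 : Int) + (k : Int)) = some s
  rw [zero_add, PySem.List.pyGet?_natCast, List.getElem?_eq_getElem hk]
  have : norm[k] = s := by rw [← hqs, hqk]
  rw [this]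

theorem pv_B_eq (rows : List (List (String × String))) :
    dedupe_blockers_alt rows = (PySem.Set.ofList (rows.map pvNormSig)).map pvToDict := by
  unfold dedupe_blockers_alt
  show (PySem.List.sorted
      (PySem.Dict.values (pvDictOf (PySem.List.enumerate (rows.map pvNormSig) 0))) (fun i => i)).map _
    = _
  set norm := rows.map pvNormSig with hn
  set e := PySem.List.enumerate norm 0 with he
  have hkeys : (pvDictOf e).keys.Perm (PySem.Set.ofList norm) := by
    rw [List.perm_ext_iff_of_nodup (pv_nodup_keys_pvDictOf e) (PySem.Set.nodup_ofList _)]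
    intro a
    rw [pv_mem_keys_pvDictOf, PySem.Set.mem_ofList, he, PySem.List.map_snd_enumerate]
  have hsorted : PySem.List.sorted (PySem.Dict.values (pvDictOf e)) (fun i => i)
      = (PySem.Set.ofList norm).map (fun s => pvFI e s) := by
    apply PySem.List.sorted_eq_of_perm_of_pairwise_lt
    · rw [pv_values_pvDictOf]
      exact hkeys.symm.map _
    · rw [List.pairwise_map]
      exact pv_pairwise norm
  rw [hsorted, List.map_map]
  apply List.map_congr_left
  intro s hsm
  have hs : s ∈ norm := (PySem.Set.mem_ofList _ _).mp hsm
  have hl := pv_lookup norm s hs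
  show (let cm := (PySem.List.pyGet? norm (pvFI e s)).getD ("", "");
        [("code", cm.1), ("message", cm.2)]) = pvToDict s
  rw [he] at *
  rw [hl]
  rfl

-- ===== VERDICT (by name: the statement is the Claim_ definition above) =====
theorem dedupe_blockers_spec : Claim_equal_dedupe_blockers := by
  intro rows _
  show dedupe_blockers rows = dedupe_blockers_alt rows
  rw [pv_A_eq, pv_B_eq]
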